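-- pv_equiv track=rewrite | github.com/jeremiah-c-leary/design-explorer | design_explorer/apps/hierarchy.py | extract_end_points
-- ===== SOURCE A (Python) =====
-- def extract_end_points(lHierarchy):
--     lReturn = []
--     for sNode in lHierarchy[::-1]:
--         fFound = False
--         for sFinalNode in lReturn:
--             if sFinalNode.count(sNode) > 0:
--                 fFound = True
--         if not fFound:
--             lReturn.append(sNode)
--
--     return lReturn[::-1]
-- ===== SOURCE B (Python) =====
-- def extract_end_points(lHierarchy):
--     if not lHierarchy:
--         return []
--     sNode = lHierarchy[0]
--     lRest = lHierarchy[1:]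
--     lKept = extract_end_points(lRest)
--     if any(sNode in sLater for sLater in lRest):
--         return lKept
--     return [sNode] + lKept
-- ===== Notes on version B (the rewrite author's own statement) =====
-- stated objective: simpler
-- what changed: Replaces the double-reversal loop with an accumulated-kept-list containment scan by a direct forward recursion that keeps a node iff it is not a substring of any node in the raw suffix, relying on substring transitivity.
import Mathlib
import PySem

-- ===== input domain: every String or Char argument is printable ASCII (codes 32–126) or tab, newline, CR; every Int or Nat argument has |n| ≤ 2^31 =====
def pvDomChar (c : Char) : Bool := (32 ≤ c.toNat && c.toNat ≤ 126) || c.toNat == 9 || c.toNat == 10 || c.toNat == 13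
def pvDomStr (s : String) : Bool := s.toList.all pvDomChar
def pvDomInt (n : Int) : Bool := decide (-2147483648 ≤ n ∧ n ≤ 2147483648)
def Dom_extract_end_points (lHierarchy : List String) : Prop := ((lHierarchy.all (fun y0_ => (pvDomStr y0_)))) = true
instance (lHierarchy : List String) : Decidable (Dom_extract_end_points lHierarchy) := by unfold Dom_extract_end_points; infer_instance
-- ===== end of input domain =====

-- B replaces A's double-reversal loop over an accumulated kept list by a forward recursion
-- that keeps a node iff it is not a substring of any node in the raw suffix (objective: simpler).


-- ===== PORT A =====
-- literal transliteration of A: walk lHierarchy[::-1], keep sNode unless some already-kept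
-- sFinalNode has sFinalNode.count(sNode) > 0, then reverse the result.
def extract_end_points (lHierarchy : List String) : List String :=
  let lReturn :=
    ((PySem.List.slice? lHierarchy none none (-1)).getD []).foldl
      (fun lReturn sNode =>
        let fFound := lReturn.foldl
          (fun fFound sFinalNode =>
            if PySem.Str.count sFinalNode sNode > 0 then true else fFound) false
        if !fFound then lReturn ++ [sNode] else lReturn)
      []
  (PySem.List.slice? lReturn none none (-1)).getD []

-- ===== PORT B =====
-- literal transliteration of Source B's recursion: keep the head iff it is not a substring
-- ('in') of any node of the rest, and recurse on the rest.
def extract_end_points_alt : List String → List String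
  | [] => []
  | sNode :: lRest =>
    let lKept := extract_end_points_alt lRest
    if lRest.any (fun sLater => PySem.Str.isIn sNode sLater) then lKept
    else sNode :: lKept

-- ===== PRECONDITION & SPEC =====
def Spec_extract_end_points (lHierarchy : List String) (out : List String) : Prop := out = extract_end_points_alt lHierarchy
instance (lHierarchy : List String) (out : List String) : Decidable (Spec_extract_end_points lHierarchy out) := by unfold Spec_extract_end_points; infer_instance

-- ===== CLAIM (what is proved, stated in full; the proofs are below) =====
def Claim_equal_extract_end_points : Prop := ∀ (lHierarchy : List String), Dom_extract_end_points lHierarchy → Spec_extract_end_points lHierarchy (extract_end_points lHierarchy)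

-- ===== LEMMAS AND PROOFS =====

-- Python's y.count(x) > 0 is exactly 'x is a substring of y'.
theorem go_pos (sub : List Char) (hsub : sub ≠ []) :
    ∀ (fuel : Nat) (l : List Char) (acc : Nat), l.length ≤ fuel →
      (0 < PySem.Chars.count.go sub fuel l acc ↔ 0 < acc ∨ sub <:+: l) := by
  intro fuel
  induction fuel with
  | zero =>
      intro l acc hl
      have : l = [] := by
        cases l with
        | nil => rfl
        | cons a t => simp at hl
      subst this
      simp [PySem.Chars.count.go, List.infix_nil, hsub]
  | succ fuel ih =>
      intro l acc hl
      cases l with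
      | nil => simp [PySem.Chars.count.go, List.infix_nil, hsub]
      | cons h t =>
          by_cases hp : sub.isPrefixOf (h :: t) = true
          · have hpre : sub <+: (h :: t) := List.isPrefixOf_iff_prefix.mp hp
            have hlen : (List.drop sub.length (h :: t)).length ≤ fuel := by
              have h1 : 1 ≤ sub.length := by
                cases sub with
                | nil => exact absurd rfl hsub
                | cons a b => simp
              have h2 : (List.drop sub.length (h :: t)).length
                  = t.length + 1 - sub.length := by
                simp [List.length_drop]
              have h3 : t.length + 1 ≤ fuel + 1 := by simpa using hl
              omega
            have hih := ih (List.drop sub.length (h :: t)) (acc + 1) hlen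
            simp only [PySem.Chars.count.go, hp, if_true]
            rw [hih]
            simp [hpre.isInfix]
          · have hnp : ¬ sub <+: (h :: t) := fun hc => hp (List.isPrefixOf_iff_prefix.mpr hc)
            have hlen : t.length ≤ fuel := by
              simp only [List.length_cons] at hl; omega
            have hih := ih t acc hlen
            simp only [PySem.Chars.count.go, hp, if_false, Bool.false_eq_true]
            rw [hih, List.infix_cons_iff]
            tauto

theorem count_pos_iff (s sub : List Char) :
    0 < PySem.Chars.count s sub ↔ sub <:+: s := by
  by_cases hsub : sub = []
  · subst hsub
    simp [PySem.Chars.count]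
  · have hne : sub.isEmpty = false := by
      cases sub with
      | nil => exact absurd rfl hsub
      | cons a b => rfl
    rw [PySem.Chars.count, hne]
    simp only [Bool.false_eq_true, if_false]
    rw [go_pos sub hsub s.length s 0 le_rfl]
    simp

-- the two containment tests of the two ports agree
theorem chars_count_pos_eq_isIn (y x : List Char) :
    (decide (0 < PySem.Chars.count y x) : Bool) = PySem.Chars.isIn x y := by
  by_cases h : x <:+: y
  · rw [(PySem.Chars.isIn_iff_infix x y).mpr h, decide_eq_true ((count_pos_iff y x).mpr h)]
  · rw [(PySem.Chars.isIn_eq_false_iff x y).mpr h,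
      decide_eq_false (fun hc => h ((count_pos_iff y x).mp hc))]

theorem count_pos_eq_isIn (y x : String) :
    (decide (PySem.Str.count y x > 0) : Bool) = PySem.Str.isIn x y := by
  simp only [PySem.Str.count_eq, PySem.Str.isIn_eq, gt_iff_lt]
  exact chars_count_pos_eq_isIn y.toList x.toList

-- substring containment is transitive
theorem isIn_trans {x z y : String} (h1 : PySem.Str.isIn x z = true)
    (h2 : PySem.Str.isIn z y = true) : PySem.Str.isIn x y = true := by
  rw [PySem.Str.isIn_eq] at h1 h2 ⊢
  exact (PySem.Chars.isIn_iff_infix x.toList y.toList).mpr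
    (((PySem.Chars.isIn_iff_infix x.toList z.toList).mp h1).trans
      ((PySem.Chars.isIn_iff_infix z.toList y.toList).mp h2))

-- A's inner flag loop is an 'any' over the kept list
theorem inner_fold_eq_any (l : List String) (x : String) (b : Bool) :
    l.foldl (fun fFound sFinalNode =>
        if PySem.Str.count sFinalNode x > 0 then true else fFound) b
      = (b || l.any (fun y => PySem.Str.isIn x y)) := by
  induction l generalizing b with
  | nil => simp
  | cons y t ih =>
      simp only [List.foldl_cons, List.any_cons]
      rw [ih]
      by_cases h : PySem.Str.count y x > 0
      · have hin : PySem.Str.isIn x y = true := by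
          rw [← count_pos_eq_isIn y x]; exact decide_eq_true h
        rw [if_pos h, hin]
        simp
      · have hin : PySem.Str.isIn x y = false := by
          rw [← count_pos_eq_isIn y x]; exact decide_eq_false h
        rw [if_neg h, hin]
        simp

-- A's outer loop, read off the back of the list
def pvR : List String → List String
  | [] => []
  | x :: t =>
      let r := pvR t
      if r.any (fun y => PySem.Str.isIn x y) then r else r ++ [x]

theorem loopA_eq_pvR (xs : List String) :
    xs.reverse.foldl
      (fun lReturn sNode =>
        let fFound := lReturn.foldl
          (fun fFound sFinalNode =>
            if PySem.Str.count sFinalNode sNode > 0 then true else fFound) false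
        if !fFound then lReturn ++ [sNode] else lReturn)
      [] = pvR xs := by
  induction xs with
  | nil => rfl
  | cons x t ih =>
      simp only [List.reverse_cons, List.foldl_append, List.foldl_cons, List.foldl_nil, ih]
      simp only [pvR, inner_fold_eq_any, Bool.false_or]
      by_cases h : (pvR t).any (fun y => PySem.Str.isIn x y) = true
      · have h' : ¬ ((! (pvR t).any (fun y => PySem.Str.isIn x y)) = true) := by
          rw [h]; decide
        rw [if_neg h', if_pos h]
      · have hb : (pvR t).any (fun y => PySem.Str.isIn x y) = false := Bool.eq_false_iff.mpr h
        have h' : (! (pvR t).any (fun y => PySem.Str.isIn x y)) = true := by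
          rw [hb]; decide
        rw [if_pos h', if_neg h]

theorem mem_pvR {y : String} : ∀ {t : List String}, y ∈ pvR t → y ∈ t := by
  intro t
  induction t with
  | nil => simp [pvR]
  | cons z t ih =>
      intro h
      simp only [pvR] at h
      by_cases hc : (pvR t).any (fun y => PySem.Str.isIn z y) = true
      · rw [if_pos hc] at h
        exact List.mem_cons_of_mem _ (ih h)
      · rw [if_neg hc] at h
        rcases List.mem_append.mp h with h' | h'
        · exact List.mem_cons_of_mem _ (ih h')
        · simp only [List.mem_singleton] at h'
          subst h'; exact List.mem_cons_self

-- a later node containing x exists among the raw suffix iff one exists among the kept ones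
theorem any_pvR (t : List String) (x : String) :
    (pvR t).any (fun y => PySem.Str.isIn x y) = t.any (fun y => PySem.Str.isIn x y) := by
  induction t with
  | nil => rfl
  | cons z t ih =>
      simp only [pvR, List.any_cons]
      by_cases hc : (pvR t).any (fun y => PySem.Str.isIn z y) = true
      · rw [if_pos hc, ih]
        by_cases hx : PySem.Str.isIn x z = true
        · rcases List.any_eq_true.mp hc with ⟨w, hw, hzw⟩
          have hxw : PySem.Str.isIn x w = true := isIn_trans hx hzw
          have ht : (t.any fun y => PySem.Str.isIn x y) = true :=
            List.any_eq_true.mpr ⟨w, mem_pvR hw, hxw⟩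
          simp only [ht, Bool.or_true]
        · have hx' : PySem.Str.isIn x z = false := Bool.eq_false_iff.mpr hx
          simp only [hx', Bool.false_or]
      · rw [if_neg hc]
        simp only [List.any_append, ih, List.any_cons, List.any_nil, Bool.or_false]
        rw [Bool.or_comm]

theorem pvR_eq_rev_alt (xs : List String) :
    pvR xs = (extract_end_points_alt xs).reverse := by
  induction xs with
  | nil => rfl
  | cons x t ih =>
      simp only [pvR, extract_end_points_alt]
      rw [any_pvR, ih]
      by_cases h : (t.any fun y => PySem.Str.isIn x y) = true
      · rw [if_pos h, if_pos h]
      · rw [if_neg h, if_neg h, List.reverse_cons]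

-- ===== VERDICT (by name: the statement is the Claim_ definition above) =====
theorem extract_end_points_spec : Claim_equal_extract_end_points := by
  intro lHierarchy _
  unfold Spec_extract_end_points
  unfold extract_end_points
  simp only [PySem.List.slice?_none_none_neg_one, Option.getD_some]
  rw [loopA_eq_pvR, pvR_eq_rev_alt, List.reverse_reverse]
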